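-- pv_equiv track=rewrite | github.com/tomdif/causal-algebraic-geometry-lean | scripts/cag_casimir_test_v2.py | count_CC_rect
-- ===== SOURCE A (Python) =====
-- from itertools import product as iproduct
--
-- def is_convex_set(S, a, L):
--     S_set = set(S)
--     for p in S_set:
--         for q in S_set:
--             if p == q:
--                 continue
--             if all(pi <= qi for pi, qi in zip(p, q)):
--                 for r in iproduct(range(p[0], q[0] + 1),
--                                   range(p[1], q[1] + 1)):
--                     if r not in S_set:
--                         return False
--     return True
--
-- def count_CC_rect(a, L):
--     """|CC([a] x [L])| via brute-force over all 2^(aL) subsets."""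
--     N = a * L
--     points = [(i, j) for i in range(a) for j in range(L)]
--     count = 0
--     for mask in range(1 << N):
--         S = [points[k] for k in range(N) if (mask >> k) & 1]
--         if is_convex_set(S, a, L):
--             count += 1
--     return count
-- ===== SOURCE B (Python) =====
-- def count_CC_rect(a, L):
--     """|CC([a] x [L])| via brute-force over all 2^(aL) subsets.
--
--     Instead of materialising each subset and scanning rectangles point by
--     point, precompute for every componentwise-comparable pair of points a
--     bitmask of its inclusive rectangle; a subset-mask is convex iff for
--     every pair whose two endpoint bits it contains it also contains the
--     whole rectangle mask.
--     """
--     N = a * L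
--     points = [(i, j) for i in range(a) for j in range(L)]
--     pairs = []
--     for k in range(N):
--         p = points[k]
--         for l in range(N):
--             q = points[l]
--             if p[0] <= q[0] and p[1] <= q[1]:
--                 rect = 0
--                 for x in range(p[0], q[0] + 1):
--                     for y in range(p[1], q[1] + 1):
--                         rect |= 1 << (x * L + y)
--                 pairs.append(((1 << k) | (1 << l), rect))
--     count = 0
--     for mask in range(1 << N):
--         if all(mask & kl != kl or rect & mask == rect for kl, rect in pairs):
--             count += 1
--     return count
-- ===== Notes on version B (the rewrite author's own statement) =====
-- stated objective: alternative
-- what changed: B precomputes one rectangle bitmask per componentwise-comparable pair of grid points and tests each subset with pure integer mask operations (with early exit over pairs), instead of A's materialising every subset as a set of tuples and scanning rectangle points one by one per pair.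
import Mathlib
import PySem

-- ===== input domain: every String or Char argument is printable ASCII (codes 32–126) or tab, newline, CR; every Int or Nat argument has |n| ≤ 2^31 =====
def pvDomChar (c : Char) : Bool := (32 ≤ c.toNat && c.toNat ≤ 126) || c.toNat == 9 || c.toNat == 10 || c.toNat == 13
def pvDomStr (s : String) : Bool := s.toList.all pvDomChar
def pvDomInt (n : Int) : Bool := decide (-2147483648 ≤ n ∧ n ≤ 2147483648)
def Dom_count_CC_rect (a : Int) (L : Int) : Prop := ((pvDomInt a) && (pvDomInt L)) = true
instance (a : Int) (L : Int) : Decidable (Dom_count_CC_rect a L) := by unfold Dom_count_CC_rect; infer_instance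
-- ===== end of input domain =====

-- B replaces A's per-subset set materialisation and early-exit rectangle scan by
-- precomputed rectangle bitmasks per comparable point pair and a pure integer-mask
-- test per subset (objective: alternative algorithm of similar asymptotic cost).

-- the points list [(i, j) for i in range(a) for j in range(L)] (identical line in both Pythons)
def pvPoints (a : Int) (L : Int) : List (Int × Int) :=
  (PySem.List.pyRange 0 a 1).flatMap (fun i =>
    (PySem.List.pyRange 0 L 1).map (fun j => (i, j)))

-- ===== PORT A =====
-- r in iproduct(range(p[0], q[0]+1), range(p[1], q[1]+1)) : the product list
def pvRect (p q : Int × Int) : List (Int × Int) :=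
  (PySem.List.pyRange p.1 (q.1 + 1) 1).flatMap (fun x =>
    (PySem.List.pyRange p.2 (q.2 + 1) 1).map (fun y => (x, y)))

-- is_convex_set(S, a, L): the early 'return False' scan as nested all-loops
def is_convex_set (S : List (Int × Int)) (a : Int) (L : Int) : Bool :=
  let S_set : PySem.Set (Int × Int) := PySem.Set.ofList S
  S_set.all (fun p => S_set.all (fun q =>
    if p == q then true
    else if p.1 ≤ q.1 ∧ p.2 ≤ q.2 then
      (pvRect p q).all (fun r => PySem.Set.contains S_set r)
    else true))

-- S = [points[k] for k in range(N) if (mask >> k) & 1]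
def pvSubset (a : Int) (L : Int) (mask : Nat) : List (Int × Int) :=
  (List.range ((a * L).toNat)).filterMap (fun (k : Nat) =>
    if (mask >>> k) &&& 1 = 1 then some (PySem.List.pyGetD (pvPoints a L) (k : Int) (0, 0)) else none)

def count_CC_rect (a : Int) (L : Int) : Int :=
  (List.range (2 ^ (a * L).toNat)).foldl (fun count mask =>
    if is_convex_set (pvSubset a L mask) a L then count + 1 else count) 0

-- ===== PORT B =====
-- rect |= 1 << (x*L + y) over the two inclusive coordinate ranges
def pvRectMask (L : Int) (p q : Int × Int) : Nat :=
  (PySem.List.pyRange p.1 (q.1 + 1) 1).foldl (fun rect x =>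
    (PySem.List.pyRange p.2 (q.2 + 1) 1).foldl (fun rect y =>
      rect ||| (1 <<< (x * L + y).toNat)) rect) 0

-- pairs.append(((1 << k) | (1 << l), rect)) over comparable index pairs
def pvPairs (a : Int) (L : Int) : List (Nat × Nat) :=
  (List.range ((a * L).toNat)).foldl (fun pairs (k : Nat) =>
    let p := PySem.List.pyGetD (pvPoints a L) (k : Int) (0, 0)
    (List.range ((a * L).toNat)).foldl (fun pairs (l : Nat) =>
      let q := PySem.List.pyGetD (pvPoints a L) (l : Int) (0, 0)
      if p.1 ≤ q.1 ∧ p.2 ≤ q.2 then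
        pairs ++ [(((1 <<< k) ||| (1 <<< l) : Nat), pvRectMask L p q)]
      else pairs) pairs) ([] : List (Nat × Nat))

def count_CC_rect_alt (a : Int) (L : Int) : Int :=
  let pairs := pvPairs a L
  (List.range (2 ^ (a * L).toNat)).foldl (fun count mask =>
    if pairs.all (fun pr => (mask &&& pr.1 != pr.1) || (pr.2 &&& mask == pr.2))
    then count + 1 else count) 0

-- ===== PRECONDITION & SPEC =====
-- Pre_ excludes exactly the inputs where Python A raises: 1 << (a*L) is a
-- ValueError for a*L < 0, and points[k] an IndexError when a*L > 0 but a < 0.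
def Pre_count_CC_rect (a : Int) (L : Int) : Prop := (0 ≤ a ∧ 0 ≤ L) ∨ a = 0 ∨ L = 0
instance (a : Int) (L : Int) : Decidable (Pre_count_CC_rect a L) := by unfold Pre_count_CC_rect; infer_instance
def pvWitness_count_CC_rect : Int × Int := (2, 2)

def Spec_count_CC_rect (a : Int) (L : Int) (out : Int) : Prop := out = count_CC_rect_alt a L
instance (a : Int) (L : Int) (out : Int) : Decidable (Spec_count_CC_rect a L out) := by unfold Spec_count_CC_rect; infer_instance

-- ===== CLAIM (what is proved, stated in full; the proofs are below) =====
def Claim_equal_count_CC_rect : Prop := ∀ (a : Int) (L : Int), Dom_count_CC_rect a L → Pre_count_CC_rect a L → Spec_count_CC_rect a L (count_CC_rect a L)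

-- ===== LEMMAS AND PROOFS =====

-- range(0, n) over a Nat cast, as a mapped List.range
theorem pv_pyRange_cast (A : Nat) :
    PySem.List.pyRange 0 (A : Int) 1 = (List.range A).map (fun (k : Nat) => (k : Int)) := by
  induction A with
  | zero => rw [PySem.List.pyRange_one_eq_nil (by omega)]; rfl
  | succ n ih =>
    have hc : ((n + 1 : Nat) : Int) = (n : Int) + 1 := by push_cast; ring
    rw [hc, PySem.List.pyRange_one_succ_right (by positivity), ih, List.range_succ, List.map_append]
    rfl

-- points = [(k / L, k % L) for k in range(a*L)] (coordinates from the flat index)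
theorem pv_points_eq (A Λ : Nat) :
    pvPoints (A : Int) (Λ : Int) =
      (List.range (A * Λ)).map (fun k => (((k / Λ : Nat) : Int), ((k % Λ : Nat) : Int))) := by
  unfold pvPoints
  rw [pv_pyRange_cast A, pv_pyRange_cast Λ]
  rcases Nat.eq_zero_or_pos Λ with hΛ | hΛ
  · subst hΛ; simp
  · induction A with
    | zero => simp
    | succ n ih =>
      rw [List.range_succ, List.map_append, List.flatMap_append, ih, Nat.succ_mul,
        List.range_add, List.map_append]
      congr 1
      simp only [List.map_cons, List.map_nil, List.flatMap_cons, List.flatMap_nil,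
        List.append_nil, List.map_map]
      apply List.map_congr_left
      intro j hj
      rw [List.mem_range] at hj
      simp only [Function.comp_apply]
      have hd : (n * Λ + j) / Λ = n := by
        rw [Nat.add_comm, Nat.add_mul_div_right _ _ hΛ, Nat.div_eq_of_lt hj]
        omega
      have hm : (n * Λ + j) % Λ = j := by
        rw [Nat.add_comm, Nat.add_mul_mod_self_right, Nat.mod_eq_of_lt hj]
      rw [hd, hm]

-- points[k] for k < a*L
theorem pv_points_get (A Λ : Nat) (k : Nat) (hk : k < A * Λ) :
    PySem.List.pyGetD (pvPoints (A : Int) (Λ : Int)) (k : Int) (0, 0)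
      = (((k / Λ : Nat) : Int), ((k % Λ : Nat) : Int)) := by
  rw [PySem.List.pyGetD_natCast, pv_points_eq]
  rw [List.getD_eq_getElem?_getD, List.getElem?_map, List.getElem?_range hk]
  rfl

-- (a*L).toNat over casts
theorem pv_toNat_mul (A Λ : Nat) : (((A : Int)) * ((Λ : Int))).toNat = A * Λ := by
  rw [← Nat.cast_mul, Int.toNat_natCast]

-- (m >> k) & 1 == 1 is the k-th bit
theorem pv_bit_iff (m k : Nat) : ((m >>> k) &&& 1 = 1) ↔ m.testBit k = true := by
  simp [Nat.testBit, Nat.and_comm]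

-- (1 << n) has exactly bit n
theorem pv_testBit_shift (n i : Nat) : ((1 <<< n) : Nat).testBit i = true ↔ i = n := by
  rw [Nat.one_shiftLeft]
  simp [Nat.testBit_two_pow, eq_comm]

-- membership in the subset selected by a bitmask
theorem pv_mem_subset (A Λ : Nat) (m : Nat) (r : Int × Int) :
    r ∈ pvSubset (A : Int) (Λ : Int) m ↔
      ∃ k, k < A * Λ ∧ m.testBit k = true ∧ r = (((k / Λ : Nat) : Int), ((k % Λ : Nat) : Int)) := by
  unfold pvSubset
  simp only [List.mem_filterMap, List.mem_range, pv_toNat_mul]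
  constructor
  · rintro ⟨k, hk, hsome⟩
    split_ifs at hsome with hbit
    · injection hsome with h
      exact ⟨k, hk, (pv_bit_iff m k).mp hbit, by rw [← h, pv_points_get A Λ k hk]⟩
  · rintro ⟨k, hk, hbit, rfl⟩
    refine ⟨k, hk, ?_⟩
    rw [if_pos ((pv_bit_iff m k).mpr hbit), pv_points_get A Λ k hk]

-- membership in A's rectangle product list
theorem pv_mem_rect (p q r : Int × Int) :
    r ∈ pvRect p q ↔ (p.1 ≤ r.1 ∧ r.1 ≤ q.1 ∧ p.2 ≤ r.2 ∧ r.2 ≤ q.2) := by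
  simp only [pvRect, List.mem_flatMap, List.mem_map, PySem.List.mem_pyRange_one]
  constructor
  · rintro ⟨x, hx, y, hy, rfl⟩; omega
  · rintro ⟨h1, h2, h3, h4⟩
    exact ⟨r.1, by omega, r.2, by omega, rfl⟩

-- A's early-exit scan, as a proposition
theorem pv_convex_iff (S : List (Int × Int)) (a L : Int) :
    is_convex_set S a L = true ↔
      ∀ p ∈ S, ∀ q ∈ S, p ≠ q → (p.1 ≤ q.1 ∧ p.2 ≤ q.2) → ∀ r ∈ pvRect p q, r ∈ S := by
  unfold is_convex_set
  simp only [List.all_eq_true, PySem.Set.mem_ofList]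
  constructor
  · intro h p hp q hq hne hle r hr
    have hh := h p hp q hq
    rw [if_neg (by simpa using hne), if_pos hle, List.all_eq_true] at hh
    have := hh r hr
    rw [PySem.Set.contains_iff] at this
    rwa [PySem.Set.mem_ofList] at this
  · intro h p hp q hq
    by_cases hpq : p = q
    · simp [hpq]
    · rw [if_neg (by simpa using hpq)]
      split_ifs with hc
      · rw [List.all_eq_true]
        intro r hr
        rw [PySem.Set.contains_iff, PySem.Set.mem_ofList]
        exact h p hp q hq hpq hc r hr
      · rfl

-- bits of a fold that only ORs in bits described by P
theorem pv_testBit_foldl {α : Type} (l : List α) (f : Nat → α → Nat) (P : α → Nat → Prop)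
    (hf : ∀ r e i, ((f r e).testBit i = true) ↔ (r.testBit i = true ∨ P e i)) :
    ∀ (init : Nat) (i : Nat),
      ((l.foldl f init).testBit i = true) ↔ (init.testBit i = true ∨ ∃ e ∈ l, P e i) := by
  induction l with
  | nil => simp
  | cons x t ih =>
    intro init i
    simp only [List.foldl_cons, ih, hf, List.mem_cons]
    constructor
    · rintro ((h | h) | ⟨y, hy, h⟩)
      · exact Or.inl h
      · exact Or.inr ⟨x, Or.inl rfl, h⟩
      · exact Or.inr ⟨y, Or.inr hy, h⟩
    · rintro (h | ⟨y, (rfl | hy), h⟩)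
      · exact Or.inl (Or.inl h)
      · exact Or.inl (Or.inr h)
      · exact Or.inr ⟨y, hy, h⟩

-- bits of the rectangle bitmask
theorem pv_testBit_rectMask (L : Int) (p q : Int × Int) (i : Nat) :
    (pvRectMask L p q).testBit i = true ↔
      ∃ x y : Int, (p.1 ≤ x ∧ x ≤ q.1) ∧ (p.2 ≤ y ∧ y ≤ q.2) ∧ i = (x * L + y).toNat := by
  unfold pvRectMask
  rw [pv_testBit_foldl _ _ (fun x i => ∃ y ∈ PySem.List.pyRange p.2 (q.2 + 1) 1, i = (x * L + y).toNat)
    (fun r e i => by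
      rw [pv_testBit_foldl _ _ (fun y i => i = (e * L + y).toNat)
        (fun r y i => by rw [Nat.testBit_or, Bool.or_eq_true, pv_testBit_shift])])]
  simp only [Nat.zero_testBit, Bool.false_eq_true, false_or, PySem.List.mem_pyRange_one]
  constructor
  · rintro ⟨x, ⟨hx1, hx2⟩, y, ⟨hy1, hy2⟩, rfl⟩
    exact ⟨x, y, ⟨hx1, by omega⟩, ⟨hy1, by omega⟩, rfl⟩
  · rintro ⟨x, y, ⟨hx1, hx2⟩, ⟨hy1, hy2⟩, rfl⟩
    exact ⟨x, ⟨hx1, by omega⟩, y, ⟨hy1, by omega⟩, rfl⟩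

-- m & x == x says every bit of x is a bit of m
theorem pv_and_eq_self (m x : Nat) :
    m &&& x = x ↔ ∀ i, x.testBit i = true → m.testBit i = true := by
  constructor
  · intro h i hx
    have hh := congrArg (fun n => n.testBit i) h
    simp only [Nat.testBit_and] at hh
    rw [hx, Bool.and_true] at hh
    rw [hh]
  · intro h
    apply Nat.eq_of_testBit_eq
    intro i
    rw [Nat.testBit_and]
    cases hx : x.testBit i
    · simp
    · simp [h i hx]

-- B's pairs list flattened
theorem pv_pairs_eq (a L : Int) :
    pvPairs a L = (List.range ((a * L).toNat)).flatMap (fun (k : Nat) =>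
      ((List.range ((a * L).toNat)).filter (fun (l : Nat) => decide
        ((PySem.List.pyGetD (pvPoints a L) (k : Int) (0, 0)).1 ≤ (PySem.List.pyGetD (pvPoints a L) (l : Int) (0, 0)).1 ∧
         (PySem.List.pyGetD (pvPoints a L) (k : Int) (0, 0)).2 ≤ (PySem.List.pyGetD (pvPoints a L) (l : Int) (0, 0)).2))).map
        (fun l => (((1 <<< k : Nat) ||| (1 <<< l : Nat) : Nat),
          pvRectMask L (PySem.List.pyGetD (pvPoints a L) (k : Int) (0, 0))
                       (PySem.List.pyGetD (pvPoints a L) (l : Int) (0, 0))))) := by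
  simp only [pvPairs]
  simp only [PySem.List.foldl_append_ite]
  rw [PySem.List.foldl_append_eq_flatMap]
  simp

-- flat index arithmetic
theorem pv_divmod (xn yn Λ : Nat) (h : yn < Λ) :
    (xn * Λ + yn) / Λ = xn ∧ (xn * Λ + yn) % Λ = yn := by
  constructor
  · rw [Nat.add_comm, Nat.add_mul_div_right _ _ (by omega), Nat.div_eq_of_lt h]
    omega
  · rw [Nat.add_comm, Nat.add_mul_mod_self_right, Nat.mod_eq_of_lt h]

-- bits of (1 << k) | (1 << l) in m
theorem pv_and_kl (m k l : Nat) :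
    m &&& ((1 <<< k) ||| (1 <<< l) : Nat) = ((1 <<< k) ||| (1 <<< l) : Nat) ↔
      (m.testBit k = true ∧ m.testBit l = true) := by
  rw [pv_and_eq_self]
  constructor
  · intro h
    refine ⟨h k ?_, h l ?_⟩
    · rw [Nat.testBit_or, Bool.or_eq_true, pv_testBit_shift, pv_testBit_shift]
      exact Or.inl rfl
    · rw [Nat.testBit_or, Bool.or_eq_true, pv_testBit_shift, pv_testBit_shift]
      exact Or.inr rfl
  · rintro ⟨h1, h2⟩ i hi
    rw [Nat.testBit_or, Bool.or_eq_true, pv_testBit_shift, pv_testBit_shift] at hi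
    rcases hi with rfl | rfl
    · exact h1
    · exact h2

-- the per-mask equivalence on a positive grid
theorem pv_pred_eq (A Λ : Nat) (_hA : 0 < A) (hΛ : 0 < Λ) (m : Nat) :
    is_convex_set (pvSubset (A : Int) (Λ : Int) m) (A : Int) (Λ : Int)
      = (pvPairs (A : Int) (Λ : Int)).all
          (fun pr => (m &&& pr.1 != pr.1) || (pr.2 &&& m == pr.2)) := by
  rw [Bool.eq_iff_iff, pv_convex_iff]
  have hmem : ∀ pr : Nat × Nat, pr ∈ pvPairs (A : Int) (Λ : Int) ↔
      ∃ k l : Nat, k < A * Λ ∧ l < A * Λ ∧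
        (((k / Λ : Nat) : Int) ≤ ((l / Λ : Nat) : Int) ∧ ((k % Λ : Nat) : Int) ≤ ((l % Λ : Nat) : Int)) ∧
        pr = (((1 <<< k) ||| (1 <<< l) : Nat),
              pvRectMask (Λ : Int) (((k / Λ : Nat) : Int), ((k % Λ : Nat) : Int))
                                   (((l / Λ : Nat) : Int), ((l % Λ : Nat) : Int))) := by
    intro pr
    rw [pv_pairs_eq]
    simp only [List.mem_flatMap, List.mem_map, List.mem_filter, List.mem_range,
      decide_eq_true_eq, pv_toNat_mul]
    constructor
    · rintro ⟨k, hk, l, ⟨hl, hcond⟩, rfl⟩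
      rw [pv_points_get A Λ k hk, pv_points_get A Λ l hl] at hcond
      exact ⟨k, l, hk, hl, hcond, by rw [pv_points_get A Λ k hk, pv_points_get A Λ l hl]⟩
    · rintro ⟨k, l, hk, hl, hcond, rfl⟩
      refine ⟨k, hk, l, ⟨hl, ?_⟩, ?_⟩
      · rw [pv_points_get A Λ k hk, pv_points_get A Λ l hl]
        exact hcond
      · rw [pv_points_get A Λ k hk, pv_points_get A Λ l hl]
  rw [List.all_eq_true]
  constructor
  · -- A's scan succeeds → every pair test passes
    intro hconv pr hpr
    rw [hmem] at hpr
    obtain ⟨k, l, hk, hl, hcond, rfl⟩ := hpr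
    simp only [Bool.or_eq_true, bne_iff_ne, ne_eq, beq_iff_eq]
    by_cases hbits : m &&& ((1 <<< k) ||| (1 <<< l) : Nat) = ((1 <<< k) ||| (1 <<< l) : Nat)
    · right
      obtain ⟨hbk, hbl⟩ := (pv_and_kl m k l).mp hbits
      rw [Nat.and_comm, pv_and_eq_self]
      intro i hib
      rw [pv_testBit_rectMask] at hib
      obtain ⟨x, y, ⟨hx1, hx2⟩, ⟨hy1, hy2⟩, rfl⟩ := hib
      have hxy : (x, y) ∈ pvSubset (A : Int) (Λ : Int) m := by
        by_cases hpq : ((((k / Λ : Nat) : Int), ((k % Λ : Nat) : Int)) : Int × Int)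
            = (((l / Λ : Nat) : Int), ((l % Λ : Nat) : Int))
        · have hfst := congrArg Prod.fst hpq
          have hsnd := congrArg Prod.snd hpq
          simp only at hfst hsnd
          have hx : x = ((k / Λ : Nat) : Int) := by omega
          have hy : y = ((k % Λ : Nat) : Int) := by omega
          rw [hx, hy, pv_mem_subset]
          exact ⟨k, hk, hbk, rfl⟩
        · exact hconv _ ((pv_mem_subset A Λ m _).mpr ⟨k, hk, hbk, rfl⟩)
                    _ ((pv_mem_subset A Λ m _).mpr ⟨l, hl, hbl, rfl⟩)
                    hpq hcond (x, y) ((pv_mem_rect _ _ _).mpr ⟨hx1, hx2, hy1, hy2⟩)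
      rw [pv_mem_subset] at hxy
      obtain ⟨j, hj, hbj, hj2⟩ := hxy
      have hfst := congrArg Prod.fst hj2
      have hsnd := congrArg Prod.snd hj2
      simp only at hfst hsnd
      have hjj : (x * ((Λ : Nat) : Int) + y).toNat = j := by
        rw [hfst, hsnd, ← Nat.cast_mul, ← Nat.cast_add, Int.toNat_natCast]
        rw [Nat.add_comm, Nat.mod_add_div']
      rwa [hjj]
    · exact Or.inl hbits
  · -- every pair test passes → A's scan succeeds
    intro hB p hp q hq hne hle r hr
    rw [pv_mem_subset] at hp hq
    obtain ⟨k, hk, hbk, rfl⟩ := hp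
    obtain ⟨l, hl, hbl, rfl⟩ := hq
    have ht := hB _ ((hmem _).mpr ⟨k, l, hk, hl, hle, rfl⟩)
    simp only [Bool.or_eq_true, bne_iff_ne, ne_eq, beq_iff_eq] at ht
    rcases ht with hno | hsub
    · exact absurd ((pv_and_kl m k l).mpr ⟨hbk, hbl⟩) hno
    · obtain ⟨x, y⟩ := r
      rw [pv_mem_rect] at hr
      obtain ⟨h1, h2, h3, h4⟩ := hr
      rw [Nat.and_comm, pv_and_eq_self] at hsub
      have hx0 : 0 ≤ x := le_trans (by positivity) h1
      have hy0 : 0 ≤ y := le_trans (by positivity) h3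
      obtain ⟨xn, rfl⟩ : ∃ xn : Nat, x = (xn : Int) := ⟨x.toNat, (Int.toNat_of_nonneg hx0).symm⟩
      obtain ⟨yn, rfl⟩ : ∃ yn : Nat, y = (yn : Int) := ⟨y.toNat, (Int.toNat_of_nonneg hy0).symm⟩
      have hxA : xn < A := by
        have hlA : l / Λ < A := (Nat.div_lt_iff_lt_mul hΛ).mpr hl
        have : (xn : Int) ≤ ((l / Λ : Nat) : Int) := h2
        exact_mod_cast lt_of_le_of_lt (by exact_mod_cast this) hlA
      have hyΛ : yn < Λ := by
        have hlΛ : l % Λ < Λ := Nat.mod_lt _ hΛ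
        have : (yn : Int) ≤ ((l % Λ : Nat) : Int) := h4
        exact_mod_cast lt_of_le_of_lt (by exact_mod_cast this) hlΛ
      have hbit := hsub (((xn : Int) * ((Λ : Nat) : Int) + (yn : Int)).toNat) (by
        rw [pv_testBit_rectMask]
        exact ⟨(xn : Int), (yn : Int), ⟨h1, h2⟩, ⟨h3, h4⟩, rfl⟩)
      rw [pv_mem_subset]
      have hcast : (((xn : Int)) * ((Λ : Nat) : Int) + ((yn : Int))).toNat = xn * Λ + yn := by
        rw [← Nat.cast_mul, ← Nat.cast_add, Int.toNat_natCast]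
      obtain ⟨hd, hm'⟩ := pv_divmod xn yn Λ hyΛ
      refine ⟨xn * Λ + yn, ?_, ?_, ?_⟩
      · calc xn * Λ + yn < xn * Λ + Λ := by omega
          _ = (xn + 1) * Λ := by ring
          _ ≤ A * Λ := Nat.mul_le_mul_right _ (by omega)
      · rw [← hcast]
        exact hbit
      · rw [hd, hm']

-- ===== VERDICT (by name: the statement is the Claim_ definition above) =====
theorem count_CC_rect_spec : Claim_equal_count_CC_rect := by
  intro a L _ hpre
  unfold Spec_count_CC_rect
  simp only [count_CC_rect, count_CC_rect_alt]
  by_cases hpos : 0 < a ∧ 0 < L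
  · obtain ⟨ha, hL⟩ := hpos
    obtain ⟨A, rfl⟩ : ∃ A : Nat, a = (A : Int) := ⟨a.toNat, (Int.toNat_of_nonneg ha.le).symm⟩
    obtain ⟨Λ, rfl⟩ : ∃ Λ : Nat, L = (Λ : Int) := ⟨L.toNat, (Int.toNat_of_nonneg hL.le).symm⟩
    apply PySem.List.foldl_congr_mem
    intro count mask _
    rw [pv_pred_eq A Λ (by exact_mod_cast ha) (by exact_mod_cast hL) mask]
  · have hz : a = 0 ∨ L = 0 := by
      rcases hpre with ⟨ha, hL⟩ | h | h
      · by_cases h0 : a = 0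
        · exact Or.inl h0
        · refine Or.inr ?_
          by_contra hL0
          exact hpos ⟨by omega, by omega⟩
      · exact Or.inl h
      · exact Or.inr h
    have hN : (a * L).toNat = 0 := by
      rcases hz with rfl | rfl
      · simp
      · simp
    apply PySem.List.foldl_congr_mem
    intro count mask _
    have hS : pvSubset a L mask = [] := by simp [pvSubset, hN]
    have hP : pvPairs a L = [] := by simp [pvPairs, hN]
    rw [hS, hP]
    rfl
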